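-- pv_equiv track=rewrite | github.com/hhhrrrttt222111/CodeChef | Easy/Dividing Stamps (DIVIDING)/dividing_stamps.py | divideStamps
-- ===== SOURCE A (Python) =====
-- def divideStamps(N, stamps):
--     stamp_count = 0
--     total_per_person = 0
--
--     #Count number of stamps
--     for i in range(len(stamps)):
--         stamp_count += stamps[i]
--
--     #Count number of stamps per person
--     for i in range(N):
--         total_per_person += i
--
--     if stamp_count >= total_per_person:
--         return 'YES'
--     return 'NO'
-- ===== SOURCE B (Python) =====
-- def divideStamps(N, stamps):
--     triangular = N * (N - 1) // 2 if N > 0 else 0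
--     return 'YES' if sum(stamps) >= triangular else 'NO'
-- ===== Notes on version B (the rewrite author's own statement) =====
-- stated objective: simpler
-- what changed: Replaced the explicit 0..N-1 accumulation loop by the closed-form triangular number N*(N-1)//2 (0 for non-positive N) and the index loop over stamps by sum(stamps), so the whole function is one arithmetic comparison.
import Mathlib
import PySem

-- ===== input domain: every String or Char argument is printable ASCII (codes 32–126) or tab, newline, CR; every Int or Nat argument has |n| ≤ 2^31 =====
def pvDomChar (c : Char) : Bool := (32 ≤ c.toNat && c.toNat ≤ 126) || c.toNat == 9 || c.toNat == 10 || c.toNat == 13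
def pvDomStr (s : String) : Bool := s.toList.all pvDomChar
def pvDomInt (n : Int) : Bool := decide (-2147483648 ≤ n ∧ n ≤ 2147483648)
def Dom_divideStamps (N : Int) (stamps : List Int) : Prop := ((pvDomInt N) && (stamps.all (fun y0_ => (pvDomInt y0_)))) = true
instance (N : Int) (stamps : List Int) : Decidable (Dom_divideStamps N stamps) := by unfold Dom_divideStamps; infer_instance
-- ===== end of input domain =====

-- B replaces both accumulation loops by sum(stamps) and the closed-form triangular number (simpler).

-- ===== PORT A =====
def divideStamps (N : Int) (stamps : List Int) : String :=
  let stamp_count : Int :=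
    (PySem.List.pyRange 0 (stamps.length : Int) 1).foldl
      (fun acc i => acc + PySem.List.pyGetD stamps i 0) 0
  let total_per_person : Int :=
    (PySem.List.pyRange 0 N 1).foldl (fun acc i => acc + i) 0
  if stamp_count ≥ total_per_person then "YES" else "NO"

-- ===== PORT B =====
def divideStamps_alt (N : Int) (stamps : List Int) : String :=
  let triangular : Int := if N > 0 then PySem.Int.floordiv (N * (N - 1)) 2 else 0
  if stamps.foldl (fun acc x => acc + x) 0 ≥ triangular then "YES" else "NO"

-- ===== PRECONDITION & SPEC =====
def Spec_divideStamps (N : Int) (stamps : List Int) (out : String) : Prop := out = divideStamps_alt N stamps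
instance (N : Int) (stamps : List Int) (out : String) : Decidable (Spec_divideStamps N stamps out) := by unfold Spec_divideStamps; infer_instance

-- ===== CLAIM (what is proved, stated in full; the proofs are below) =====
def Claim_equal_divideStamps : Prop := ∀ (N : Int) (stamps : List Int), Dom_divideStamps N stamps → Spec_divideStamps N stamps (divideStamps N stamps)

-- ===== LEMMAS AND PROOFS =====

-- twice the sum of range(n) is n*(n-1)
theorem pv_two_mul_foldl_range (n : Nat) (a : Int) :
    2 * ((PySem.List.pyRange 0 (n : Int) 1).foldl (fun acc i => acc + i) a)
      = 2 * a + (n : Int) * ((n : Int) - 1) := by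
  induction n generalizing a with
  | zero => simp [PySem.List.pyRange_one_eq_nil]
  | succ m ih =>
    have h : PySem.List.pyRange 0 ((m : Int) + 1) 1
        = PySem.List.pyRange 0 (m : Int) 1 ++ [(m : Int)] :=
      PySem.List.pyRange_one_succ_right (by exact_mod_cast Int.natCast_nonneg m)
    push_cast
    rw [h, List.foldl_append]
    simp only [List.foldl]
    have := ih a
    -- fold of appended singleton: first generalize the inner fold
    set s := (PySem.List.pyRange 0 (m : Int) 1).foldl (fun acc i => acc + i) a with hs
    nlinarith [this]

theorem pv_sum_stamps (stamps : List Int) :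
    (PySem.List.pyRange 0 (stamps.length : Int) 1).foldl
      (fun acc i => acc + PySem.List.pyGetD stamps i 0) 0
    = stamps.foldl (fun acc x => acc + x) 0 :=
  PySem.List.foldl_pyRange_zero_pyGetD' stamps 0 (fun acc x => acc + x) 0

-- ===== VERDICT (by name: the statement is the Claim_ definition above) =====
theorem divideStamps_spec : Claim_equal_divideStamps := by
  intro N stamps _
  unfold Spec_divideStamps divideStamps divideStamps_alt
  rw [pv_sum_stamps]
  by_cases hN : N > 0
  · have hn : N = ((N.toNat : Nat) : Int) := by omega
    have h2 : 2 * ((PySem.List.pyRange 0 N 1).foldl (fun acc i => acc + i) 0)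
        = N * (N - 1) := by
      rw [hn]; simpa using pv_two_mul_foldl_range N.toNat 0
    have hfd : N * (N - 1) / 2
        = (PySem.List.pyRange 0 N 1).foldl (fun acc i => acc + i) 0 := by
      rw [← h2]; exact Int.mul_ediv_cancel_left _ (by norm_num)
    simp only [if_pos hN, PySem.Int.floordiv_eq_ediv_of_pos (show (0:Int) < 2 by norm_num), hfd]
  · have : PySem.List.pyRange 0 N 1 = [] :=
      PySem.List.pyRange_one_eq_nil (by omega)
    simp [hN, this]
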